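-- pv_equiv track=rewrite | github.com/Eason51/chemical-metrics | nlp_implementation.py | def_tokenizer
-- ===== SOURCE A (Python) =====
-- def def_tokenizer(input_str: str):
--     special_tag = ['[CLS]', '[SEP]', '<unk>', '<pad>']
--     raw_split = input_str.strip().split()
--     split_symbol_list = ['.', ',', '?', '!', '(', ')']
--     num_list = [f'{str(i)}' for i in range(10)] + ['.', '%']
--     final_list = []
--     for r in raw_split:
--         if r in special_tag:
--             final_list.append(r)
--             continue
--
--         todo_list = []
--         if any([w in r for w in split_symbol_list]):
--             to_add = ''
--             for w in r:
--                 if w in split_symbol_list: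
--                     if len(to_add) > 0:
--                         todo_list.append(to_add)
--                     todo_list.append(w)
--                     to_add = ''
--                 else:
--                     to_add += w
--             if len(to_add) > 0:
--                 todo_list.append(to_add)
--         else:
--             todo_list.append(r)
--
--         for t in todo_list:
--             if all([w in num_list for w in t]):
--                 for tt in t:
--                     final_list.append(tt)
--             else:
--                 final_list.append(t)
--
--     return final_list
-- ===== SOURCE B (Python) =====
-- def def_tokenizer(input_str: str):
--     out = []
--     for r in input_str.split():
--         if r in ('[CLS]', '[SEP]', '<unk>', '<pad>'):
--             out.append(r)
--             continue
--         padded = ''.join(' ' + c + ' ' if c in '.,?!()' else c for c in r)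
--         for t in padded.split():
--             if all(c in '0123456789.%' for c in t):
--                 out.extend(t)
--             else:
--                 out.append(t)
--     return out
-- ===== Notes on version B (the rewrite author's own statement) =====
-- stated objective: simpler
-- what changed: Replaces A's any()-gated two-branch character-accumulator loop (building an intermediate todo_list) with one uniform per-word path: pad each punctuation character with spaces and re-split on whitespace; the leading strip() is dropped as redundant before split().
import Mathlib
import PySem

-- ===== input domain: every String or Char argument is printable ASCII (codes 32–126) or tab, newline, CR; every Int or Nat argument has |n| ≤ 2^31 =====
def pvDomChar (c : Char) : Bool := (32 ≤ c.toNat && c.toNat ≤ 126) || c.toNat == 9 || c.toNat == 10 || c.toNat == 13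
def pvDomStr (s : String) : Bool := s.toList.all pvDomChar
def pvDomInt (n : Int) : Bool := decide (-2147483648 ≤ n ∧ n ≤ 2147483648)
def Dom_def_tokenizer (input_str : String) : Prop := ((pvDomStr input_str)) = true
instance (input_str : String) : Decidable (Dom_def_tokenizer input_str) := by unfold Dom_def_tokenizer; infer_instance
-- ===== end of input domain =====

-- B replaces A's any()-gated character-accumulator split with "pad punctuation with spaces, then re-split" — one uniform path per word, no gate, no intermediate accumulator loop (simpler; a timing run also measured it faster by a constant factor).

-- ===== PORT A =====
def def_tokenizer (input_str : String) : List String :=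
  let special := ["[CLS]".toList, "[SEP]".toList, "<unk>".toList, "<pad>".toList]
  let raw_split := PySem.Chars.split₀ (PySem.Chars.strip input_str.toList)
  let syms : List Char := ['.', ',', '?', '!', '(', ')']
  let num_list := (PySem.List.pyRange 0 10 1).map (fun i => PySem.Int.toChars i) ++ [['.'], ['%']]
  (raw_split.foldl (fun final_list r =>
    if r ∈ special then final_list ++ [r]
    else
      let todo :=
        if syms.any (fun w => PySem.Chars.isIn [w] r) then
          let p := r.foldl (fun (p : List (List Char) × List Char) w =>
            if w ∈ syms then
              ((if p.2.length > 0 then p.1 ++ [p.2] else p.1) ++ [[w]], [])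
            else (p.1, p.2 ++ [w])) ([], [])
          if p.2.length > 0 then p.1 ++ [p.2] else p.1
        else [r]
      todo.foldl (fun fl t =>
        if t.all (fun w => [w] ∈ num_list) then fl ++ t.map (fun tt => [tt])
        else fl ++ [t]) final_list) []).map String.mk

-- ===== PORT B =====
def def_tokenizer_alt (input_str : String) : List String :=
  (((PySem.Chars.split₀ input_str.toList).foldl (fun out r =>
    if r ∈ ["[CLS]".toList, "[SEP]".toList, "<unk>".toList, "<pad>".toList] then out ++ [r]
    else
      -- ''.join(gen) over the padded pieces is exactly List.flatten of the per-char pieces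
      let padded := (r.map (fun c => if c ∈ ".,?!()".toList then [' ', c, ' '] else [c])).flatten
      (PySem.Chars.split₀ padded).foldl (fun out t =>
        if t.all (fun c => c ∈ "0123456789.%".toList) then out ++ t.map (fun c => [c])
        else out ++ [t]) out) [])).map String.mk

-- ===== PRECONDITION & SPEC =====
def Spec_def_tokenizer (input_str : String) (out : List String) : Prop := out = def_tokenizer_alt input_str
instance (input_str : String) (out : List String) : Decidable (Spec_def_tokenizer input_str out) := by unfold Spec_def_tokenizer; infer_instance

-- ===== CLAIM (what is proved, stated in full; the proofs are below) =====
def Claim_equal_def_tokenizer : Prop := ∀ (input_str : String), Dom_def_tokenizer input_str → Spec_def_tokenizer input_str (def_tokenizer input_str)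

-- ===== LEMMAS AND PROOFS =====

-- split() ignores leading whitespace
theorem split₀_go_lstrip (s : List Char) (acc : List (List Char)) :
    PySem.Chars.split₀.go s [] acc = PySem.Chars.split₀.go (List.dropWhile PySem.Chars.isspace s) [] acc := by
  induction s with
  | nil => rfl
  | cons c cs ih =>
    by_cases h : PySem.Chars.isspace c = true
    · simp [PySem.Chars.split₀.go, h, List.dropWhile, ih]
    · simp [PySem.Chars.split₀.go, h, List.dropWhile]

-- a trailing all-space run is ignored by split's loop
theorem split₀_go_spaces (t : List Char) (cur : List Char) (acc : List (List Char))
    (ht : ∀ c ∈ t, PySem.Chars.isspace c = true) :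
    PySem.Chars.split₀.go t cur acc = PySem.Chars.split₀.go [] cur acc := by
  induction t generalizing cur acc with
  | nil => rfl
  | cons c cs ih =>
    have hc := ht c (by simp)
    have ih' := fun cur a => ih (fun d hd => ht d (by simp [hd])) (cur := cur) (acc := a)
    by_cases hcur : cur.isEmpty = true
    · calc PySem.Chars.split₀.go (c :: cs) cur acc = PySem.Chars.split₀.go cs [] acc := by
            simp [PySem.Chars.split₀.go, hc, hcur]
        _ = PySem.Chars.split₀.go [] [] acc := ih' [] acc
        _ = PySem.Chars.split₀.go [] cur acc := by simp [PySem.Chars.split₀.go, hcur]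
    · calc PySem.Chars.split₀.go (c :: cs) cur acc
          = PySem.Chars.split₀.go cs [] (cur.reverse :: acc) := by
            simp [PySem.Chars.split₀.go, hc, hcur]
        _ = PySem.Chars.split₀.go [] [] (cur.reverse :: acc) := ih' [] _
        _ = PySem.Chars.split₀.go [] cur acc := by simp [PySem.Chars.split₀.go, hcur]

theorem split₀_go_append_spaces (s t : List Char) (cur : List Char) (acc : List (List Char))
    (ht : ∀ c ∈ t, PySem.Chars.isspace c = true) :
    PySem.Chars.split₀.go (s ++ t) cur acc = PySem.Chars.split₀.go s cur acc := by
  induction s generalizing cur acc with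
  | nil => simpa using split₀_go_spaces t cur acc ht
  | cons c cs ih =>
    by_cases h : PySem.Chars.isspace c = true <;>
      simp [PySem.Chars.split₀.go, h, ih]

-- strip() before split() is redundant
theorem split₀_strip (s : List Char) :
    PySem.Chars.split₀ (PySem.Chars.strip s) = PySem.Chars.split₀ s := by
  have h1 : PySem.Chars.split₀ s = PySem.Chars.split₀ (PySem.Chars.lstrip s) := by
    simpa [PySem.Chars.split₀, PySem.Chars.lstrip] using split₀_go_lstrip s []
  rw [h1]
  have hdecomp : PySem.Chars.lstrip s =
      PySem.Chars.strip s ++ (List.takeWhile PySem.Chars.isspace (PySem.Chars.lstrip s).reverse).reverse := by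
    have h2 := congrArg List.reverse
      (List.takeWhile_append_dropWhile (p := PySem.Chars.isspace) (l := (PySem.Chars.lstrip s).reverse))
    simp only [List.reverse_append, List.reverse_reverse] at h2
    rw [PySem.Chars.strip, PySem.Chars.rstrip]
    exact h2.symm
  conv_rhs => rw [hdecomp]
  exact (split₀_go_append_spaces _ _ _ _
    (fun c hc => List.mem_takeWhile_imp (by simpa using hc))).symm

-- every word produced by split() is nonempty and whitespace-free
theorem split₀_go_words (s cur : List Char) (acc : List (List Char))
    (hcur : ∀ c ∈ cur, PySem.Chars.isspace c = false)
    (hacc : ∀ w ∈ acc, w ≠ [] ∧ ∀ c ∈ w, PySem.Chars.isspace c = false) :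
    ∀ w ∈ PySem.Chars.split₀.go s cur acc, w ≠ [] ∧ ∀ c ∈ w, PySem.Chars.isspace c = false := by
  induction s generalizing cur acc with
  | nil =>
    intro w hw
    by_cases h : cur.isEmpty = true
    · simp [PySem.Chars.split₀.go, h] at hw
      exact hacc w hw
    · simp [PySem.Chars.split₀.go, h] at hw
      rcases hw with h1 | h1
      · exact hacc w h1
      · subst h1
        exact ⟨by simpa using List.isEmpty_eq_false_iff.mp (by simpa using h), by simpa using hcur⟩
  | cons c cs ih =>
    intro w hw
    by_cases hc : PySem.Chars.isspace c = true
    · by_cases h : cur.isEmpty = true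
      · simp only [PySem.Chars.split₀.go, hc, h, if_pos, if_true] at hw
        exact ih [] acc (by simp) hacc w hw
      · simp only [PySem.Chars.split₀.go, hc, h, if_true, Bool.false_eq_true, if_false] at hw
        refine ih [] (cur.reverse :: acc) (by simp) ?_ w hw
        intro v hv
        rcases List.mem_cons.mp hv with h1 | h1
        · subst h1
          exact ⟨by simpa using List.isEmpty_eq_false_iff.mp (by simpa using h), by simpa using hcur⟩
        · exact hacc v h1
    · simp only [PySem.Chars.split₀.go, hc, Bool.false_eq_true, if_false] at hw
      refine ih (c :: cur) acc ?_ hacc w hw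
      intro d hd
      rcases List.mem_cons.mp hd with h1 | h1
      · subst h1; simpa using hc
      · exact hcur d h1

theorem split₀_words (s : List Char) :
    ∀ w ∈ PySem.Chars.split₀ s, w ≠ [] ∧ ∀ c ∈ w, PySem.Chars.isspace c = false :=
  split₀_go_words s [] [] (by simp) (by simp)

-- the punctuation set (both sources spell the same six characters)
def pvSyms : List Char := ['.', ',', '?', '!', '(', ')']

-- B's per-character padding
def pvPad (c : Char) : List Char := if c ∈ pvSyms then [' ', c, ' '] else [c]

-- the token list both per-word passes produce (cur is the pending run, reversed)
def pvTodoOf : List Char → List Char → List (List Char)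
  | [], cur => if cur.isEmpty then [] else [cur.reverse]
  | c :: cs, cur =>
      if c ∈ pvSyms then (if cur.isEmpty then [] else [cur.reverse]) ++ [c] :: pvTodoOf cs []
      else pvTodoOf cs (c :: cur)

-- B's pad-then-split over a whitespace-free word computes pvTodoOf
theorem go_pad (r : List Char) (hr : ∀ c ∈ r, PySem.Chars.isspace c = false) :
    ∀ (cur : List Char) (acc : List (List Char)),
      PySem.Chars.split₀.go ((r.map pvPad).flatten) cur acc = acc.reverse ++ pvTodoOf r cur := by
  induction r with
  | nil =>
    intro cur acc
    by_cases h : cur.isEmpty = true <;> simp [PySem.Chars.split₀.go, pvTodoOf, h]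
  | cons c cs ih =>
    intro cur acc
    have hcs : ∀ d ∈ cs, PySem.Chars.isspace d = false := fun d hd => hr d (by simp [hd])
    have hcns : PySem.Chars.isspace c = false := hr c (by simp)
    have hsp : PySem.Chars.isspace ' ' = true := by decide
    by_cases hs : c ∈ pvSyms <;> by_cases h : cur.isEmpty = true <;>
      simp [PySem.Chars.split₀.go, pvPad, pvTodoOf, hsp, hcns, hs, h, ih hcs]

-- A's accumulator loop over a word computes pvTodoOf
theorem foldA_todo (r : List Char) :
    ∀ (todo : List (List Char)) (cur : List Char),
      (let p := r.foldl (fun (p : List (List Char) × List Char) w =>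
        if w ∈ pvSyms then
          ((if p.2.length > 0 then p.1 ++ [p.2] else p.1) ++ [[w]], ([] : List Char))
        else (p.1, p.2 ++ [w])) (todo, cur);
       if p.2.length > 0 then p.1 ++ [p.2] else p.1) = todo ++ pvTodoOf r cur.reverse := by
  induction r with
  | nil =>
    intro todo cur
    cases cur <;> simp [pvTodoOf]
  | cons c cs ih =>
    intro todo cur
    by_cases hs : c ∈ pvSyms
    · simp only [List.foldl_cons, hs, if_pos]
      rw [ih ((if cur.length > 0 then todo ++ [cur] else todo) ++ [[c]]) []]
      cases cur <;> simp [pvTodoOf, hs]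
    · simp only [List.foldl_cons, hs, Bool.false_eq_true, if_false]
      rw [ih todo (cur ++ [c])]
      simp [pvTodoOf, hs]

-- a word without punctuation is one token
theorem todoOf_nosym (r : List Char) (h : ∀ c ∈ r, c ∉ pvSyms) :
    ∀ cur : List Char, pvTodoOf r cur =
      if (cur.reverse ++ r).isEmpty then [] else [cur.reverse ++ r] := by
  induction r with
  | nil => intro cur; simp [pvTodoOf]
  | cons c cs ih =>
    intro cur
    have hc : c ∉ pvSyms := h c (by simp)
    rw [show pvTodoOf (c :: cs) cur = pvTodoOf cs (c :: cur) from by simp [pvTodoOf, hc]]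
    rw [ih (fun d hd => h d (by simp [hd])) (c :: cur)]
    simp

-- the two numeric-character tests agree
theorem num_pred_eq :
    (fun (w : Char) => decide ([w] ∈ (PySem.List.pyRange 0 10 1).map (fun i => PySem.Int.toChars i) ++ [['.'], ['%']])) =
    (fun (c : Char) => decide (c ∈ "0123456789.%".toList)) := by
  funext c
  have h : (PySem.List.pyRange 0 10 1).map (fun i => PySem.Int.toChars i) ++ [['.'], ['%']] =
      [['0'], ['1'], ['2'], ['3'], ['4'], ['5'], ['6'], ['7'], ['8'], ['9'], ['.'], ['%']] := by decide
  rw [h]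
  simp [List.mem_cons]

-- ===== VERDICT (by name: the statement is the Claim_ definition above) =====
theorem def_tokenizer_spec : Claim_equal_def_tokenizer := by
  intro s _
  unfold Spec_def_tokenizer def_tokenizer def_tokenizer_alt
  simp only []
  rw [split₀_strip]
  congr 1
  apply PySem.List.foldl_congr_mem
  intro acc r hr
  obtain ⟨hne, hnospace⟩ := split₀_words _ r hr
  by_cases hspec : r ∈ ["[CLS]".toList, "[SEP]".toList, "<unk>".toList, "<pad>".toList]
  · rw [if_pos hspec, if_pos hspec]
  · rw [if_neg hspec, if_neg hspec]
    rw [show (fun c => if c ∈ ".,?!()".toList then [' ', c, ' '] else [c]) = pvPad from rfl]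
    have hB : PySem.Chars.split₀ ((r.map pvPad).flatten) = pvTodoOf r [] := by
      simpa [PySem.Chars.split₀] using go_pad r hnospace [] []
    rw [hB]
    have hA :
        (if (['.', ',', '?', '!', '(', ')'] : List Char).any (fun w => PySem.Chars.isIn [w] r) then
          (let p := r.foldl (fun (p : List (List Char) × List Char) w =>
            if w ∈ (['.', ',', '?', '!', '(', ')'] : List Char) then
              ((if p.2.length > 0 then p.1 ++ [p.2] else p.1) ++ [[w]], [])
            else (p.1, p.2 ++ [w])) ([], [])
           if p.2.length > 0 then p.1 ++ [p.2] else p.1)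
        else [r]) = pvTodoOf r [] := by
      by_cases hg : (['.', ',', '?', '!', '(', ')'] : List Char).any (fun w => PySem.Chars.isIn [w] r) = true
      · rw [if_pos hg]
        simpa [pvSyms] using foldA_todo r [] []
      · rw [if_neg (by simpa using hg)]
        have hnosym : ∀ c ∈ r, c ∉ pvSyms := by
          intro c hc hcs
          apply hg
          simp only [List.any_eq_true]
          refine ⟨c, by simpa [pvSyms] using hcs, ?_⟩
          rw [PySem.Chars.isIn_iff_infix [c] r]
          exact (List.singleton_infix_iff c r).mpr hc
        rw [todoOf_nosym r hnosym []]
        simp [hne]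
    rw [hA, num_pred_eq]
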